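-- pv_equiv track=rewrite | github.com/jio-ping/coding-test | 12982.py | soltuion
-- ===== SOURCE A (Python) =====
-- def soltuion(d,budget):
--     total = 0
--     cnt =0
--     for dept in sorted(d):
--         if budget > total + dept :
--             total += dept
--             cnt +=1
--     return cnt
-- ===== SOURCE B (Python) =====
-- def soltuion(d, budget):
--     prefix = []
--     s = 0
--     for x in sorted(d):
--         s += x
--         prefix.append(s)
--     cnt = 0
--     for s in prefix:
--         if s >= budget:
--             break
--         cnt += 1
--     return cnt
-- ===== Notes on version B (the rewrite author's own statement) =====
-- stated objective: alternative
-- what changed: B materializes the sorted prefix sums in one pass and then counts the leading sums strictly below budget, stopping at the first failure, instead of A's single fold that conditionally accumulates a running total while scanning the whole list.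
import Mathlib
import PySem

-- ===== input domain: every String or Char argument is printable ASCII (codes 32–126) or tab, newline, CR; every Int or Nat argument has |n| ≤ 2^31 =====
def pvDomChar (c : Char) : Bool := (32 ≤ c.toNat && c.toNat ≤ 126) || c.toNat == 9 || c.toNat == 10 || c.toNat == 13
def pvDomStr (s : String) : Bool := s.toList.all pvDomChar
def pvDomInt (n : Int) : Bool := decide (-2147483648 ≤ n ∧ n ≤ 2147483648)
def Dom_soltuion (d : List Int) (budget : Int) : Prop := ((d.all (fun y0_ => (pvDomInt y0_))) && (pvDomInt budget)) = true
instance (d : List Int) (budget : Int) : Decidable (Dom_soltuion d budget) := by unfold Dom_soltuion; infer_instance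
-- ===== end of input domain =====

-- B builds the sorted prefix sums explicitly and counts the leading ones strictly below budget
-- (stopping at the first failure), instead of A's conditional running-total fold over the whole list.


-- ===== PORT A =====
def soltuion (d : List Int) (budget : Int) : Int :=
  (PySem.List.sorted d (fun x => x) false).foldl
    (fun (st : Int × Int) dept =>
      if st.1 + dept < budget then (st.1 + dept, st.2 + 1) else st)
    (0, 0) |>.2

-- ===== PORT B =====
-- first pass of Source B: build the list of prefix sums of the sorted list
def pvPrefix (xs : List Int) (s : Int) : List Int :=
  match xs with
  | [] => []
  | x :: rest => (s + x) :: pvPrefix rest (s + x)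

-- second pass of Source B: count leading sums < budget, break at the first ≥ budget
def pvCountLead (ps : List Int) (budget : Int) : Int :=
  match ps with
  | [] => 0
  | s :: rest => if s ≥ budget then 0 else 1 + pvCountLead rest budget

def soltuion_alt (d : List Int) (budget : Int) : Int :=
  pvCountLead (pvPrefix (PySem.List.sorted d (fun x => x) false) 0) budget

-- ===== PRECONDITION & SPEC =====
def Spec_soltuion (d : List Int) (budget : Int) (out : Int) : Prop := out = soltuion_alt d budget
instance (d : List Int) (budget : Int) (out : Int) : Decidable (Spec_soltuion d budget out) := by unfold Spec_soltuion; infer_instance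

-- ===== CLAIM (what is proved, stated in full; the proofs are below) =====
def Claim_equal_soltuion : Prop := ∀ (d : List Int) (budget : Int), Dom_soltuion d budget → Spec_soltuion d budget (soltuion d budget)

-- ===== LEMMAS AND PROOFS =====

-- once the condition fails for every remaining element, A's fold is the identity
theorem pv_fold_fixed (budget : Int) (xs : List Int) (t c : Int)
    (h : ∀ y ∈ xs, budget ≤ t + y) :
    xs.foldl (fun (st : Int × Int) dept =>
      if st.1 + dept < budget then (st.1 + dept, st.2 + 1) else st) (t, c) = (t, c) := by
  induction xs with
  | nil => rfl
  | cons x rest ih =>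
    have hx : budget ≤ t + x := h x (by simp)
    simp only [List.foldl_cons, if_neg (by omega : ¬ t + x < budget)]
    exact ih (fun y hy => h y (by simp [hy]))

-- on a ≤-sorted list, A's fold counts exactly the leading prefix sums below budget
theorem pv_fold_eq_count (budget : Int) (xs : List Int)
    (hs : xs.Pairwise (· ≤ ·)) : ∀ t c : Int,
    (xs.foldl (fun (st : Int × Int) dept =>
      if st.1 + dept < budget then (st.1 + dept, st.2 + 1) else st) (t, c)).2
      = c + pvCountLead (pvPrefix xs t) budget := by
  induction xs with
  | nil => intro t c; simp [pvPrefix, pvCountLead]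
  | cons x rest ih =>
    intro t c
    rcases List.pairwise_cons.mp hs with ⟨hx, hrest⟩
    by_cases h : t + x < budget
    · simp only [List.foldl_cons, if_pos h, pvPrefix, pvCountLead, if_neg (by omega : ¬ t + x ≥ budget)]
      rw [ih hrest (t + x) (c + 1)]; ring
    · simp only [List.foldl_cons, if_neg h, pvPrefix, pvCountLead, if_pos (by omega : t + x ≥ budget)]
      rw [pv_fold_fixed budget rest t c (fun y hy => by have := hx y hy; omega)]
      ring

-- ===== VERDICT (by name: the statement is the Claim_ definition above) =====
theorem soltuion_spec : Claim_equal_soltuion := by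
  intro d budget _
  unfold Spec_soltuion soltuion soltuion_alt
  have hs := PySem.List.sorted_pairwise (xs := d) (key := fun x : Int => x)
  simpa using pv_fold_eq_count budget (PySem.List.sorted d (fun x => x) false) hs 0 0
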